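-- pv_equiv track=rewrite | github.com/mnhkhadang/bmttnc-hutech-2280601353 | Lab_2/cipher/playfair/playfair_cipher.py | clean_decrypted_text
-- ===== SOURCE A (Python) =====
-- def clean_decrypted_text(text):
--     # Loại bỏ các ký tự X được chèn vào nếu cần
--     cleaned = ""
--     i = 0
--     while i < len(text):
--         if i + 2 < len(text) and text[i] == text[i + 2] and text[i + 1] == 'X':
--             cleaned += text[i]
--             i += 2
--         else:
--             cleaned += text[i]
--             i += 1
--     if cleaned.endswith('X'):
--         cleaned = cleaned[:-1]
--     return cleaned
-- ===== SOURCE B (Python) =====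
-- def clean_decrypted_text(text):
--     # Mask pass: cond[i] says the char at position i+1 is an 'X' between equal neighbours.
--     cond = [b == 'X' and a == c for a, b, c in zip(text, text[1:], text[2:])]
--     keep = []
--     prev_dropped = False
--     # A character is dropped iff its mask bit is set and the previous character
--     # was not itself dropped (matches the original scan's non-overlapping jumps).
--     for ch, c in zip(text, [False] + cond + [False, False]):
--         d = c and not prev_dropped
--         if not d:
--             keep.append(ch)
--         prev_dropped = d
--     return ''.join(keep).removesuffix('X')
-- ===== Notes on version B (the rewrite author's own statement) =====
-- stated objective: faster
-- what changed: Replaces A's index-jumping while-loop with quadratic string concatenation by a precomputed neighbour mask (zip of the text with its two shifts) followed by a single flag-carrying filter pass into a list joined once, finishing with str.removesuffix.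
import Mathlib
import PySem

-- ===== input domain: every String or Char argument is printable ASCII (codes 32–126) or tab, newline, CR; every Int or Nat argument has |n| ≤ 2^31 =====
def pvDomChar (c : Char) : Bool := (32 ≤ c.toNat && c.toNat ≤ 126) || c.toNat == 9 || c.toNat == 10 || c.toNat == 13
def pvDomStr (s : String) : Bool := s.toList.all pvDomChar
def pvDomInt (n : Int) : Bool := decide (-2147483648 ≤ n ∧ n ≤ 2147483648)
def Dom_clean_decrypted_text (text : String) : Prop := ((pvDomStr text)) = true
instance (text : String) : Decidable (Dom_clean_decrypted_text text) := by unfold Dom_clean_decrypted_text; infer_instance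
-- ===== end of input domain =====

-- B replaces A's index-jumping while-loop (with its repeated string concatenation) by a
-- precomputed neighbour mask and a single flag-carrying filter pass joined once (objective: faster).

-- ===== PORT A =====
-- A's while-loop: at each position, if the char two ahead equals the current one
-- and the next char is 'X', emit the current char and jump by 2, else step by 1.
def cleanA : List Char → List Char
  | c :: x :: d :: rest =>
      if c == d && x == 'X' then c :: cleanA (d :: rest)
      else c :: cleanA (x :: d :: rest)
  | c :: rest => c :: cleanA rest
  | [] => []

def clean_decrypted_text (text : String) : String :=
  let cleaned := cleanA text.toList
  -- cleaned.endswith('X') → cleaned[:-1]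
  if PySem.Chars.endswith cleaned ['X'] then String.ofList (PySem.List.slice cleaned none (some (-1)))
  else String.ofList cleaned

-- ===== PORT B =====
-- cond = [b == 'X' and a == c for a, b, c in zip(text, text[1:], text[2:])]
def condsB (cs : List Char) : List Bool :=
  List.zipWith3 (fun a b c => b == 'X' && a == c) cs
    (PySem.List.slice cs (some 1) none) (PySem.List.slice cs (some 2) none)

-- the for-loop over zip(text, [False] + cond + [False, False]) with state prev_dropped
def goB : Bool → List (Char × Bool) → List Char
  | _, [] => []
  | prev, (ch, c) :: t =>
      let d := c && !prev
      if d then goB d t else ch :: goB d t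

def clean_decrypted_text_alt (text : String) : String :=
  let cs := text.toList
  let keep := goB false (cs.zip (false :: (condsB cs ++ [false, false])))
  -- ''.join(keep).removesuffix('X'): exact — drops one trailing 'X' if present
  if PySem.Chars.endswith keep ['X'] then String.ofList (PySem.List.slice keep none (some (-1)))
  else String.ofList keep

-- ===== PRECONDITION & SPEC =====
def Spec_clean_decrypted_text (text : String) (out : String) : Prop := out = clean_decrypted_text_alt text
instance (text : String) (out : String) : Decidable (Spec_clean_decrypted_text text out) := by unfold Spec_clean_decrypted_text; infer_instance

-- ===== CLAIM (what is proved, stated in full; the proofs are below) =====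
def Claim_equal_clean_decrypted_text : Prop := ∀ (text : String), Dom_clean_decrypted_text text → Spec_clean_decrypted_text text (clean_decrypted_text text)

-- ===== LEMMAS AND PROOFS =====

lemma slice1 (cs : List Char) : PySem.List.slice cs (some 1) none = cs.drop 1 := by
  have h := PySem.List.slice_from_natCast (xs := cs) (a := 1); push_cast at h; simpa using h

lemma slice2 (cs : List Char) : PySem.List.slice cs (some 2) none = cs.drop 2 := by
  have h := PySem.List.slice_from_natCast (xs := cs) (a := 2); push_cast at h; simpa using h

lemma condsB_nil : condsB [] = [] := rfl

lemma condsB_one (c : Char) : condsB [c] = [] := by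
  simp only [condsB, slice1, slice2]; rfl

lemma condsB_two (c x : Char) : condsB [c, x] = [] := by
  simp only [condsB, slice1, slice2]; rfl

lemma condsB_cons3 (c x d : Char) (rest : List Char) :
    condsB (c :: x :: d :: rest) = (x == 'X' && c == d) :: condsB (x :: d :: rest) := by
  simp [condsB, slice1, slice2, List.zipWith3]

lemma goB_cons (prev : Bool) (ch : Char) (c : Bool) (t : List (Char × Bool)) :
    goB prev ((ch, c) :: t) =
      if (c && !prev) then goB (c && !prev) t else ch :: goB (c && !prev) t := rfl

lemma go_eq (cs : List Char) : ∀ (prev h : Bool), (h && !prev) = false →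
    goB prev (cs.zip (h :: (condsB cs ++ [false, false]))) = cleanA cs := by
  induction cs using cleanA.induct with
  | case1 c x d rest hcond ih =>
      intro prev h hh
      obtain ⟨hc, hx⟩ : c = d ∧ x = 'X' := by simpa using hcond
      subst hc hx
      rw [condsB_cons3]
      match rest with
      | [] =>
          rw [condsB_two]
          simp [goB_cons, hh, cleanA, goB]
      | e :: t =>
          rw [condsB_cons3]
          have H := ih true (c == 'X' && 'X' == e) (by simp)
          simp only [List.cons_append, List.zip_cons_cons, goB_cons, hh, Bool.not_false,
            Bool.not_true, Bool.and_true, Bool.and_false, Bool.false_eq_true, beq_self_eq_true,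
            if_true, if_false] at H ⊢
          rw [H]
          simp [cleanA]
  | case2 c x d rest hcond ih =>
      intro prev h hh
      rw [condsB_cons3]
      rw [Bool.not_eq_true] at hcond
      have hq : (x == 'X' && c == d) = false := by rw [Bool.and_comm]; exact hcond
      have H := ih false (x == 'X' && c == d) (by simp [hq])
      simp only [List.cons_append, List.zip_cons_cons, goB_cons, hh, hq, Bool.not_false,
        Bool.not_true, Bool.and_true, Bool.and_false, Bool.false_eq_true, if_true, if_false] at H ⊢
      rw [H]
      have hP : ¬(c = d ∧ x = 'X') := by simpa using hcond
      simp [cleanA, hP]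
  | case3 c rest hne ih =>
      intro prev h hh
      match rest, hne with
      | [], _ => rw [condsB_one]; simp [goB_cons, hh, cleanA, goB]
      | [x], _ => rw [condsB_two]; simp [goB_cons, hh, cleanA, goB]
      | a :: b :: t, hne => exact absurd rfl (hne a b t)
  | case4 => intro prev h hh; simp [condsB_nil, goB, cleanA]

-- ===== VERDICT (by name: the statement is the Claim_ definition above) =====
theorem clean_decrypted_text_spec : Claim_equal_clean_decrypted_text := by
  intro text _
  simp only [Spec_clean_decrypted_text, clean_decrypted_text, clean_decrypted_text_alt,
    go_eq text.toList false false rfl]
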